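-- pv_equiv track=rewrite | github.com/henrinikku/tira2021 | viikko3/bitsort.py | solve
-- ===== SOURCE A (Python) =====
-- def solve(s: str):
--     ones = 0
--     result = 0
--     for c in s:
--         if c == "1":
--             ones += 1
--         else:
--             result += ones
--     return result
-- ===== SOURCE B (Python) =====
-- def solve(s: str):
--     remaining = sum(c != "1" for c in s)
--     result = 0
--     for c in s:
--         if c == "1":
--             result += remaining
--         else:
--             remaining -= 1
--     return result
-- ===== Notes on version B (the rewrite author's own statement) =====
-- stated objective: alternative
-- what changed: B sums, for each '1', the number of non-'1' characters to its RIGHT (maintaining a decreasing 'remaining' counter seeded by a pre-count), instead of A's sum, for each non-'1', of the '1's to its left.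
import Mathlib
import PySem

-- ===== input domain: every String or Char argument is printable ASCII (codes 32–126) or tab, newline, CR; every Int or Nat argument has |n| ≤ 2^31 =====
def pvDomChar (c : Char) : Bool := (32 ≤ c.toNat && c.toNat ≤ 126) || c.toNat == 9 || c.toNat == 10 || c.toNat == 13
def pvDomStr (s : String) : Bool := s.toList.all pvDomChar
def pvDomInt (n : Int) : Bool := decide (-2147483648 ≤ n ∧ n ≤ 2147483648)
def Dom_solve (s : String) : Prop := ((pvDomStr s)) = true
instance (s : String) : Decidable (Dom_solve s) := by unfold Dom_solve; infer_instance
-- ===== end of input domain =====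

-- B scans right-to-left in spirit: it sums, for each '1', the non-'1' characters after it,
-- instead of A's sum, for each non-'1', of the '1's before it. Alternative decomposition, same O(n) cost.

-- ===== PORT A =====
-- state = (ones, result)
def solveStepA (st : Int × Int) (c : Char) : Int × Int :=
  if c = '1' then (st.1 + 1, st.2) else (st.1, st.2 + st.1)

def solve (s : String) : Int :=
  (s.toList.foldl solveStepA (0, 0)).2

-- ===== PORT B =====
-- remaining = sum(c != "1" for c in s)
def solveCountB (s : String) : Int :=
  s.toList.foldl (fun a c => a + (if c ≠ '1' then 1 else 0)) 0

-- state = (remaining, result)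
def solveStepB (st : Int × Int) (c : Char) : Int × Int :=
  if c = '1' then (st.1, st.2 + st.1) else (st.1 - 1, st.2)

def solve_alt (s : String) : Int :=
  (s.toList.foldl solveStepB (solveCountB s, 0)).2

-- ===== PRECONDITION & SPEC =====
def Spec_solve (s : String) (out : Int) : Prop := out = solve_alt s
instance (s : String) (out : Int) : Decidable (Spec_solve s out) := by unfold Spec_solve; infer_instance

-- ===== CLAIM (what is proved, stated in full; the proofs are below) =====
def Claim_equal_solve : Prop := ∀ (s : String), Dom_solve s → Spec_solve s (solve s)

-- ===== LEMMAS AND PROOFS =====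

-- number of non-'1' characters (the value B's pre-count computes)
def zCnt (l : List Char) : Int := ((l.countP (fun c => c ≠ '1') : Nat) : Int)

theorem zCnt_cons (c : Char) (t : List Char) :
    zCnt (c :: t) = (if c = '1' then 0 else 1) + zCnt t := by
  simp [zCnt, List.countP_cons]
  by_cases h : c = '1'
  · simp [h]
  · simp [h]; omega

theorem solveCountB_eq (s : String) : solveCountB s = zCnt s.toList := by
  unfold solveCountB
  suffices h : ∀ (l : List Char) (a : Int),
      l.foldl (fun a c => a + (if c ≠ '1' then 1 else 0)) a = a + zCnt l by
    simpa using h s.toList 0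
  intro l
  induction l with
  | nil => intro a; simp [zCnt]
  | cons c t ih =>
      intro a
      simp only [List.foldl_cons, ih, zCnt_cons]
      by_cases h : c = '1'
      · simp [h]
      · simp [h]; ring

-- A's accumulator decomposition
theorem foldA_snd (l : List Char) : ∀ (o r : Int),
    (l.foldl solveStepA (o, r)).2 = r + o * zCnt l + (l.foldl solveStepA (0, 0)).2 := by
  induction l with
  | nil => intro o r; simp [zCnt]
  | cons c t ih =>
      intro o r
      by_cases h : c = '1'
      · simp only [List.foldl_cons, solveStepA, h, if_true, zCnt_cons, zero_add]
        rw [ih (o + 1) r, ih 1 0]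
        ring
      · simp only [List.foldl_cons, solveStepA, zCnt_cons, if_neg h, zero_add, add_zero]
        rw [ih o (r + o), ih 0 0]
        ring

-- B's result accumulator is additive
theorem foldB_snd (l : List Char) : ∀ (rem r : Int),
    (l.foldl solveStepB (rem, r)).2 = r + (l.foldl solveStepB (rem, 0)).2 := by
  induction l with
  | nil => intro rem r; simp
  | cons c t ih =>
      intro rem r
      by_cases h : c = '1'
      · simp only [List.foldl_cons, solveStepB, h, if_true]
        rw [ih rem (r + rem), ih rem (0 + rem)]
        ring
      · simp only [List.foldl_cons, solveStepB, if_neg h]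
        rw [ih (rem - 1) r]

-- main: the two folds agree when B starts with the non-'1' count
theorem foldA_eq_foldB (l : List Char) :
    (l.foldl solveStepA (0, 0)).2 = (l.foldl solveStepB (zCnt l, 0)).2 := by
  induction l with
  | nil => simp
  | cons c t ih =>
      by_cases h : c = '1'
      · simp only [List.foldl_cons, solveStepA, solveStepB, h, if_true, zCnt_cons, zero_add]
        rw [foldA_snd t 1 0, foldB_snd t (zCnt t) (zCnt t), ih]
        ring
      · simp only [List.foldl_cons, solveStepA, solveStepB, if_neg h, zCnt_cons, zero_add, add_zero]
        rw [foldA_snd t 0 0]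
        have hz : (1 : Int) + zCnt t - 1 = zCnt t := by ring
        rw [hz, ih]
        ring

-- ===== VERDICT (by name: the statement is the Claim_ definition above) =====
theorem solve_spec : Claim_equal_solve := by
  intro s _
  unfold Spec_solve solve solve_alt
  rw [solveCountB_eq, foldA_eq_foldB]
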